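-- pv_equiv track=rewrite | github.com/MichaelHeinecke/CodingPractice | DataEngineeringProblems/sweep_line.py | max_concurrent_viewers
-- ===== SOURCE A (Python) =====
-- def max_concurrent_viewers(views):
--     start_events = [(e[0], 1) for e in views]
--     end_events = [(e[1], -1) for e in views]
--     all_events = start_events + end_events
--     sorted_events = sorted(all_events, key=lambda e: (e[0], e[1]))
--
--     max_viewers = 0
--     viewers = 0
--     time_ranges = []
--     current_start = None
--     for ts, delta in sorted_events:
--         prev_viewers = viewers
--         viewers += delta
--
--         # Viewer joins
--         # Viewers increase over prev max viewers
--         if viewers > max_viewers: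
--             time_ranges.clear()
--             max_viewers = viewers
--             current_start = ts
--         # Viewers joins, count equal to prev max viewers
--         elif viewers == max_viewers and delta == 1:
--             current_start = ts
--
--         # Viewer leaves
--         # Close max period
--         if prev_viewers == max_viewers and viewers < max_viewers:
--             time_ranges.append((current_start, ts))
--             current_start = None
--
--     return max_viewers, time_ranges
-- ===== SOURCE B (Python) =====
-- def max_concurrent_viewers(views):
--     # Two-pass sweep: pass 1 finds the maximum; pass 2 collects its time ranges.
--     events = sorted([(s, 1) for s, _ in views] + [(e, -1) for _, e in views])
--
--     max_viewers = 0
--     viewers = 0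
--     for _, delta in events:
--         viewers += delta
--         if viewers > max_viewers:
--             max_viewers = viewers
--
--     time_ranges = []
--     viewers = 0
--     current_start = None
--     for ts, delta in events:
--         prev = viewers
--         viewers += delta
--         if viewers == max_viewers and delta == 1:
--             current_start = ts
--         if prev == max_viewers and viewers < max_viewers:
--             time_ranges.append((current_start, ts))
--             current_start = None
--     return max_viewers, time_ranges
-- ===== Notes on version B (the rewrite author's own statement) =====
-- stated objective: alternative
-- what changed: A interleaves max-tracking with range collection in one sweep, clearing the ranges list each time a new maximum appears; B decomposes it into two passes over the same sorted events: pass 1 only computes the maximum with a running counter, pass 2 collects the ranges of that known maximum, so no clearing or max-update logic is mixed into the range bookkeeping.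
-- outside the precondition, e.g. on max_concurrent_viewers([(5, 5)]): A returns (0, [(None, 5)]), B returns (0, [(None, 5)]); on max_concurrent_viewers([(3, 1)]): A returns (0, [(None, 1)]), B returns (0, [(None, 1)])
import Mathlib
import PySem

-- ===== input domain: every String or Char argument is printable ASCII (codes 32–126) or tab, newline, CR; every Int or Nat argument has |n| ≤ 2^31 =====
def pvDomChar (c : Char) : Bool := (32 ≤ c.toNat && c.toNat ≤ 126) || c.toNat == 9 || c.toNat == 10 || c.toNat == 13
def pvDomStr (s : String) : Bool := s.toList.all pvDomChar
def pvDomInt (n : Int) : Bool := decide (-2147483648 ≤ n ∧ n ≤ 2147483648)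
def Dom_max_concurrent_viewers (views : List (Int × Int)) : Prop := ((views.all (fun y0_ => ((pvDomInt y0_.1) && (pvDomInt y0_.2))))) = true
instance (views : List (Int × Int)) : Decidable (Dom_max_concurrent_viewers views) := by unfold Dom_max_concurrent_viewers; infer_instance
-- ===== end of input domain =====

-- B replaces A's single sweep (which clears the range list on every new maximum) by two passes over
-- the same sorted events: pass 1 computes the maximum, pass 2 collects its ranges; same O(n log n) cost.


-- ===== PORT A =====
-- A's loop body; state = (max_viewers, viewers, time_ranges, current_start).
-- Where Python appends (None, ts) we append (0, ts): Pre_ excludes exactly those inputs.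
def stepA (s : Int × Int × List (Int × Int) × Option Int) (ev : Int × Int) :
    Int × Int × List (Int × Int) × Option Int :=
  let ts := ev.1
  let delta := ev.2
  let prev := s.2.1
  let v := prev + delta
  let t : Int × List (Int × Int) × Option Int :=
    if v > s.1 then (v, [], some ts)
    else if v = s.1 ∧ delta = 1 then (s.1, s.2.2.1, some ts)
    else (s.1, s.2.2.1, s.2.2.2)
  if prev = t.1 ∧ v < t.1 then (t.1, v, t.2.1 ++ [(t.2.2.getD 0, ts)], none)
  else (t.1, v, t.2.1, t.2.2)

def max_concurrent_viewers (views : List (Int × Int)) : Int × (List (Int × Int)) :=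
  let start_events := views.map (fun e => (e.1, (1 : Int)))
  let end_events := views.map (fun e => (e.2, (-1 : Int)))
  let all_events := start_events ++ end_events
  let sorted_events := PySem.List.sorted2 all_events (fun e => e.1) (fun e => e.2) false
  let st := sorted_events.foldl stepA (0, 0, [], none)
  (st.1, st.2.2.1)

-- ===== PORT B =====
-- pass 1: state = (max_viewers, viewers)
def pass1 (s : Int × Int) (ev : Int × Int) : Int × Int :=
  let v := s.2 + ev.2
  (if v > s.1 then v else s.1, v)

-- pass 2 (the known maximum M is a parameter): state = (viewers, time_ranges, current_start).
-- Where Python appends (None, ts) we append (0, ts): Pre_ excludes exactly those inputs.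
def pass2 (M : Int) (s : Int × List (Int × Int) × Option Int) (ev : Int × Int) :
    Int × List (Int × Int) × Option Int :=
  let prev := s.1
  let v := prev + ev.2
  let cs := if v = M ∧ ev.2 = 1 then some ev.1 else s.2.2
  if prev = M ∧ v < M then (v, s.2.1 ++ [(cs.getD 0, ev.1)], none)
  else (v, s.2.1, cs)

def max_concurrent_viewers_alt (views : List (Int × Int)) : Int × (List (Int × Int)) :=
  -- Python's plain sorted on int pairs is lexicographic = sorted2 on the two components
  let events := PySem.List.sorted2
    (views.map (fun e => (e.1, (1 : Int))) ++ views.map (fun e => (e.2, (-1 : Int))))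
    (fun e => e.1) (fun e => e.2) false
  let M := (events.foldl pass1 (0, 0)).1
  let fin := events.foldl (pass2 M) (0, [], none)
  (M, fin.2.1)

-- ===== PRECONDITION & SPEC =====
-- the same sorted event list both ports build (Pre_ may not reach the ports, so it is restated here)
def preEvents (views : List (Int × Int)) : List (Int × Int) :=
  PySem.List.sorted2
    (views.map (fun e => (e.1, (1 : Int))) ++ views.map (fun e => (e.2, (-1 : Int))))
    (fun e => e.1) (fun e => e.2) false

-- Pre_ excludes exactly the nonempty inputs on which no prefix of the sorted events has more
-- starts than ends (the swept concurrency never becomes positive): there Python A's result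
-- contains a pair (None, ts), which is not a value of the declared list-of-int-pairs type.
def Pre_max_concurrent_viewers (views : List (Int × Int)) : Prop :=
  views = [] ∨ ∃ k ≤ (preEvents views).length, 0 < (((preEvents views).take k).map Prod.snd).sum
instance (views : List (Int × Int)) : Decidable (Pre_max_concurrent_viewers views) := by
  unfold Pre_max_concurrent_viewers; infer_instance

def pvWitness_max_concurrent_viewers : (List (Int × Int)) := [(1, 3), (2, 5), (4, 6)]

def Spec_max_concurrent_viewers (views : List (Int × Int)) (out : Int × (List (Int × Int))) : Prop := out = max_concurrent_viewers_alt views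
instance (views : List (Int × Int)) (out : Int × (List (Int × Int))) : Decidable (Spec_max_concurrent_viewers views out) := by unfold Spec_max_concurrent_viewers; infer_instance

-- ===== CLAIM (what is proved, stated in full; the proofs are below) =====
def Claim_equal_max_concurrent_viewers : Prop := ∀ (views : List (Int × Int)), Dom_max_concurrent_viewers views → Pre_max_concurrent_viewers views → Spec_max_concurrent_viewers views (max_concurrent_viewers views)

-- ===== LEMMAS AND PROOFS =====

-- pass 1 never decreases the running maximum
theorem pass1_fst_ge (es : List (Int × Int)) (m v : Int) :
    m ≤ (es.foldl pass1 (m, v)).1 := by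
  induction es generalizing m v with
  | nil => simp
  | cons ev es ih =>
    simp only [List.foldl_cons, pass1]
    split
    · exact le_trans (by omega) (ih _ _)
    · exact ih _ _

-- The sweep invariant: from any state with viewers ≤ max, A's one-pass fold equals
-- (final max, final viewers, B's pass-2 fold with that final max) — pass 2 started on A's
-- current range state if the maximum never grows again, and on a fresh state otherwise.
theorem sweep_eq (es : List (Int × Int)) (m v : Int) (r : List (Int × Int)) (cs : Option Int)
    (hvm : v ≤ m) (hd : ∀ ev ∈ es, ev.2 = 1 ∨ ev.2 = -1) :
    es.foldl stepA (m, v, r, cs) =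
      ((es.foldl pass1 (m, v)).1,
        es.foldl (pass2 (es.foldl pass1 (m, v)).1)
          (if (es.foldl pass1 (m, v)).1 = m then (v, r, cs) else (v, [], none))) := by
  induction es generalizing m v r cs with
  | nil => simp
  | cons ev es ih =>
    obtain ⟨ts, d⟩ := ev
    have hd1 : d = 1 ∨ d = -1 := hd (ts, d) (by simp)
    have hdrest : ∀ ev ∈ es, ev.2 = 1 ∨ ev.2 = -1 := fun e he => hd e (by simp [he])
    simp only [List.foldl_cons]
    by_cases hgt : v + d > m
    · -- new maximum: A clears; pass 1 raises its max to v + d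
      have hstep : stepA (m, v, r, cs) (ts, d) = (v + d, v + d, [], some ts) := by
        simp only [stepA]
        rw [if_pos hgt]
        simp only []
        rw [if_neg (by omega)]
      have hp1 : pass1 (m, v) (ts, d) = (v + d, v + d) := by
        simp only [pass1]; rw [if_pos hgt]
      rw [hstep]; simp only [hp1]; rw [ih (v + d) (v + d) [] (some ts) le_rfl hdrest]
      set M := (es.foldl pass1 (v + d, v + d)).1 with hM
      have hMge : v + d ≤ M := pass1_fst_ge es (v + d) (v + d)
      have hMne : M ≠ m := by omega
      have hd1' : d = 1 := by omega
      -- B's pass-2 step from the fresh state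
      have hstep2 : pass2 M (v, [], none) (ts, d) =
          (v + d, [], if v + d = M ∧ d = 1 then some ts else none) := by
        simp only [pass2]
        rw [if_neg (by omega)]
      rw [if_neg hMne, hstep2]
      by_cases hMv : M = v + d
      · have hcc : (if v + d = M ∧ d = 1 then some ts else none : Option ℤ) = some ts :=
          if_pos ⟨hMv.symm, hd1'⟩
        rw [hcc, if_pos hMv]
      · have hcc : (if v + d = M ∧ d = 1 then some ts else none : Option ℤ) = none :=
          if_neg (fun h => hMv h.1.symm)
        rw [hcc, if_neg hMv]
    · -- maximum unchanged on this step
      have hvm' : v + d ≤ m := by omega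
      have hp1 : pass1 (m, v) (ts, d) = (m, v + d) := by
        simp only [pass1]; rw [if_neg hgt]
      -- A's step from (m, v, r, cs)
      set cs1 : Option Int := if v + d = m ∧ d = 1 then some ts else cs with hcs1
      set st1 : Int × Int × List (Int × Int) × Option Int :=
        if v = m ∧ v + d < m then (m, v + d, r ++ [(cs1.getD 0, ts)], none)
        else (m, v + d, r, cs1) with hst1
      have hstep : stepA (m, v, r, cs) (ts, d) = st1 := by
        simp only [stepA, hst1, hcs1]
        rw [if_neg hgt]
        by_cases he : v + d = m ∧ d = 1
        · rw [if_pos he, if_pos he]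
        · rw [if_neg he, if_neg he]
      have hst1fst : st1.1 = m := by rw [hst1]; split <;> rfl
      have hst1v : st1.2.1 = v + d := by rw [hst1]; split <;> rfl
      have hst1vm : st1.2.1 ≤ st1.1 := by rw [hst1fst, hst1v]; omega
      rw [hstep]; simp only [hp1]
      have ihx := ih st1.1 st1.2.1 st1.2.2.1 st1.2.2.2 hst1vm hdrest
      rw [show (st1.1, st1.2.1, st1.2.2.1, st1.2.2.2) = st1 from rfl] at ihx
      rw [hst1fst, hst1v] at ihx
      rw [ihx]
      set M := (es.foldl pass1 (m, v + d)).1 with hM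
      have hMge : m ≤ M := pass1_fst_ge es m (v + d)
      by_cases hMm : M = m
      · -- max already final: A's state components feed pass 2 unchanged
        rw [if_pos hMm, if_pos hMm]
        have hstep2 : pass2 M (v, r, cs) (ts, d) = (st1.2.1, st1.2.2.1, st1.2.2.2) := by
          simp only [pass2, hst1, hcs1, hMm]
          by_cases ha : v = m ∧ v + d < m
          · rw [if_pos ha, if_pos ha]
          · rw [if_neg ha, if_neg ha]
        rw [hstep2, hst1v]
      · -- max still to grow: both sides stay on the fresh state
        rw [if_neg hMm, if_neg hMm]
        have hstep2 : pass2 M (v, [], none) (ts, d) = (v + d, [], none) := by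
          simp only [pass2]
          rw [if_neg (by omega)]
          have : ¬ (v + d = M ∧ d = 1) := by omega
          rw [if_neg this]
        rw [hstep2]

-- ===== VERDICT (by name: the statement is the Claim_ definition above) =====
theorem max_concurrent_viewers_spec : Claim_equal_max_concurrent_viewers := by
  intro views _ _
  unfold Spec_max_concurrent_viewers max_concurrent_viewers max_concurrent_viewers_alt
  simp only []
  set es := PySem.List.sorted2
    (views.map (fun e => (e.1, (1 : Int))) ++ views.map (fun e => (e.2, (-1 : Int))))
    (fun e => e.1) (fun e => e.2) false with hes
  have hd : ∀ ev ∈ es, ev.2 = 1 ∨ ev.2 = -1 := by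
    intro ev hev
    have hperm := PySem.List.sorted2_perm
      (views.map (fun e => (e.1, (1 : Int))) ++ views.map (fun e => (e.2, (-1 : Int))))
      (fun e => e.1) (fun e => e.2) false
    rw [hes] at hev
    have hev := hperm.mem_iff.mp hev
    rcases List.mem_append.mp hev with h | h <;>
      · obtain ⟨p, _, hp⟩ := List.mem_map.mp h
        subst hp; simp
  have hsw := sweep_eq es 0 0 [] none le_rfl hd
  rw [hsw]
  split <;> rfl
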